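-- pv_equiv track=rewrite | github.com/Oktovivian/Tubes_TBA_Kelompok-9 | FA_TBA_Kelompok9.py | FOR
-- ===== SOURCE A (Python) =====
-- def inTerminal(teks, terminal):
--     status = True
--     i = 0
--     while i < len(teks)-1 and status:
--         if teks[i] not in terminal:
--             status = False
--         i+=1
--     return status
--
-- def FOR(teks):
--     terminal=['f','o','r']
--     daftarState=['Q0','Q1','Q2','FOR']
--     tabel=[['Q1','error','error'],
--         ['error','Q2','error'],
--         ['error','error','FOR'],
--         ['error','error','error']]
--     state='Q0'
--     i=0
--     teks = ''.join(teks)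
--     teks+='#'
--     status=teks[i] != '#' and inTerminal(teks, terminal)
--     while (status and teks[i]!='#'):
--         state=tabel[daftarState.index(state)][terminal.index(teks[i])]
--         i+=1
--         if (state=='error'):
--             status=False
--
--     if state != 'FOR':
--         state = 'error'
--     return state
-- ===== SOURCE B (Python) =====
-- def FOR(teks):
--     teks = ''.join(teks)
--     return 'FOR' if teks == 'for' else 'error'
-- ===== Notes on version B (the rewrite author's own statement) =====
-- stated objective: simpler
-- what changed: Replaces the DFA state table, index loop and the inTerminal pre-scan with a single equality test against 'for' (the only string the automaton accepts), keeping the initial ''.join.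
import Mathlib
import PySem

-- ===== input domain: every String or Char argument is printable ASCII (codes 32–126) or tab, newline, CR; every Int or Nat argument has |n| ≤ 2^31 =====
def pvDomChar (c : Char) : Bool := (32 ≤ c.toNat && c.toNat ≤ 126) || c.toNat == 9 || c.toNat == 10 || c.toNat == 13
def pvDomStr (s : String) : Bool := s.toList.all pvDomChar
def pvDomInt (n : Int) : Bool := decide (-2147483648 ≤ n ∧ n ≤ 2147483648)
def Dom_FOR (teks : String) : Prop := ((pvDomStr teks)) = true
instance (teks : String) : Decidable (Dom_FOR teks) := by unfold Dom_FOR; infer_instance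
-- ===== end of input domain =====

-- B replaces A's DFA table and scans by one equality test against "for"; objective: simpler.
-- ===== PORT A =====
-- the local constants of the Python FOR, lifted to helpers so the loop can cite them
def pvTerminal : List Char := ['f', 'o', 'r']
def pvDaftarState : List String := ["Q0", "Q1", "Q2", "FOR"]
def pvTabel : List (List String) :=
  [["Q1", "error", "error"],
   ["error", "Q2", "error"],
   ["error", "error", "FOR"],
   ["error", "error", "error"]]

-- inTerminal's while loop over index i with the early-exit status flag.
-- teks[i] with 0 ≤ i < len(teks)-1 is always in range, so getD is exact here.
def inTerminalGo (l : List Char) (terminal : List Char) (i : Nat) (status : Bool) : Bool :=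
  if h : i < l.length - 1 ∧ status = true then
    inTerminalGo l terminal (i + 1) (if (l.getD i ' ') ∈ terminal then status else false)
  else status
termination_by l.length - 1 - i
decreasing_by omega

def inTerminal (teks : List Char) (terminal : List Char) : Bool :=
  inTerminalGo teks terminal 0 true

-- FOR's while loop: state/i/status exactly as in the Python; teks[i] is always in
-- range while the condition holds (the list ends with '#'), so getD is exact, and the
-- .index lookups always succeed on the values reached, so getD-defaults are exact too.
def pvFORgo (l : List Char) (state : String) (i : Nat) (status : Bool) : String :=
  if h : status = true ∧ l.getD i '#' ≠ '#' then
    let st' := (pvTabel.getD ((PySem.List.index? pvDaftarState state).getD 0) []).getD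
                 ((PySem.List.index? pvTerminal (l.getD i '#')).getD 0) "error"
    pvFORgo l st' (i + 1) (if st' = "error" then false else status)
  else state
termination_by l.length - i
decreasing_by
  have : i < l.length := by
    by_contra hge
    exact h.2 (List.getD_eq_default _ _ (by omega))
  omega

def FOR (teks : String) : String :=
  -- ''.join(teks) on a str argument is the identity; then teks += '#'
  let l : List Char := teks.toList ++ ['#']
  let status : Bool := (decide (l.getD 0 '#' ≠ '#')) && inTerminal l pvTerminal
  let state := pvFORgo l "Q0" 0 status
  if state ≠ "FOR" then "error" else state

-- ===== PORT B =====
def FOR_alt (teks : String) : String :=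
  -- ''.join(teks) on a str argument is the identity
  if teks = "for" then "FOR" else "error"

-- ===== PRECONDITION & SPEC =====
def Spec_FOR (teks : String) (out : String) : Prop := out = FOR_alt teks
instance (teks : String) (out : String) : Decidable (Spec_FOR teks out) := by unfold Spec_FOR; infer_instance

-- ===== CLAIM (what is proved, stated in full; the proofs are below) =====
def Claim_equal_FOR : Prop := ∀ (teks : String), Dom_FOR teks → Spec_FOR teks (FOR teks)

-- ===== LEMMAS AND PROOFS =====

-- the status flag false ends both loops at once
theorem inTerminalGo_false (l terminal : List Char) (i : Nat) :
    inTerminalGo l terminal i false = false := by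
  rw [inTerminalGo]; simp

theorem pvFORgo_false (l : List Char) (state : String) (i : Nat) :
    pvFORgo l state i false = state := by
  rw [pvFORgo]; simp

-- characterisation of the inTerminal scan on a list ending in '#'
theorem inTerminalGo_char (l : List Char) (terminal : List Char) :
    ∀ i, inTerminalGo (l ++ ['#']) terminal i true = (l.drop i).all (· ∈ terminal) := by
  intro i
  induction hn : l.length - i using Nat.strong_induction_on generalizing i with
  | _ n ih =>
    rw [inTerminalGo]
    by_cases hi : i < l.length
    · have hget : (l ++ ['#']).getD i ' ' = l.getD i ' ' := by
        rw [List.getD_eq_getElem?_getD, List.getD_eq_getElem?_getD,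
            List.getElem?_append_left hi]
      have hlen : (l ++ ['#']).length - 1 = l.length := by simp
      have hdrop : l.drop i = l[i] :: l.drop (i + 1) := List.drop_eq_getElem_cons hi
      simp only [hlen, hi, true_and, dif_pos, hget]
      rw [List.getD_eq_getElem?_getD, List.getElem?_eq_getElem hi]
      simp only [Option.getD_some]
      by_cases hmem : l[i] ∈ terminal
      · simp only [hmem, if_pos]
        rw [ih (l.length - (i+1)) (by omega) (i+1) rfl]
        rw [hdrop, List.all_cons]
        simp [hmem]
      · simp only [hmem, if_neg, not_false_iff]
        rw [inTerminalGo_false]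
        rw [hdrop, List.all_cons]
        simp [hmem]
    · have : ¬ i < (l ++ ['#']).length - 1 := by simp; omega
      simp only [this, false_and, dif_neg, not_false_iff]
      rw [List.drop_eq_nil_of_le (by omega)]
      rfl

theorem inTerminal_char (l : List Char) :
    inTerminal (l ++ ['#']) pvTerminal = l.all (· ∈ pvTerminal) := by
  simpa using inTerminalGo_char l pvTerminal 0

-- one DFA step, with the current character given explicitly
theorem pvFORgo_step (l : List Char) (state : String) (i : Nat) (c : Char)
    (hget : l.getD i '#' = c) (hc : c ≠ '#') :
    pvFORgo l state i true =
      pvFORgo l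
        ((pvTabel.getD ((PySem.List.index? pvDaftarState state).getD 0) []).getD
           ((PySem.List.index? pvTerminal c).getD 0) "error")
        (i + 1)
        (if ((pvTabel.getD ((PySem.List.index? pvDaftarState state).getD 0) []).getD
           ((PySem.List.index? pvTerminal c).getD 0) "error") = "error" then false else true) := by
  rw [List.getD_eq_getElem?_getD] at hget
  rw [pvFORgo]
  simp [hget, hc]

-- at '#' the loop stops
theorem pvFORgo_hash (l : List Char) (state : String) (i : Nat) (s : Bool)
    (hget : l.getD i '#' = '#') :
    pvFORgo l state i s = state := by
  rw [List.getD_eq_getElem?_getD] at hget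
  rw [pvFORgo]; simp [hget]

-- a transition into "error" from any state kills the run
theorem pvFORgo_err (l : List Char) (state : String) (i : Nat) (c : Char)
    (hget : l.getD i '#' = c) (hc : c ≠ '#')
    (herr : (pvTabel.getD ((PySem.List.index? pvDaftarState state).getD 0) []).getD
           ((PySem.List.index? pvTerminal c).getD 0) "error" = "error") :
    pvFORgo l state i true = "error" := by
  rw [pvFORgo_step l state i c hget hc, herr]
  simp [pvFORgo_false]

-- a non-error step, with the new state computed
theorem pvFORgo_step_ok (l : List Char) (state : String) (i : Nat) (c : Char) (st' : String)
    (hget : l.getD i '#' = c) (hc : c ≠ '#')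
    (hst : (pvTabel.getD ((PySem.List.index? pvDaftarState state).getD 0) []).getD
           ((PySem.List.index? pvTerminal c).getD 0) "error" = st')
    (hne : st' ≠ "error") :
    pvFORgo l state i true = pvFORgo l st' (i + 1) true := by
  rw [pvFORgo_step l state i c hget hc, hst]
  simp [hne]

-- the whole DFA run on lists of terminal characters: "FOR" exactly on ['f','o','r']
theorem run_all (l : List Char) (hall : l.all (· ∈ pvTerminal) = true) :
    if l = ['f','o','r'] then pvFORgo (l ++ ['#']) "Q0" 0 true = "FOR"
    else pvFORgo (l ++ ['#']) "Q0" 0 true ≠ "FOR" := by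
  rcases l with _ | ⟨c, rest⟩
  · rw [if_neg (by simp), pvFORgo_hash _ _ 0 _ (by simp [List.getD])]
    decide
  · simp only [List.all_cons, Bool.and_eq_true] at hall
    obtain ⟨hc, hall⟩ := hall
    have g0 : ((c :: rest) ++ ['#']).getD 0 '#' = c := by simp [List.getD]
    have hc' : c = 'f' ∨ c = 'o' ∨ c = 'r' := by
      simpa [pvTerminal] using hc
    rcases hc' with rfl | rfl | rfl
    · -- 'f' : Q0 → Q1
      rw [pvFORgo_step_ok _ _ _ 'f' "Q1" g0 (by decide) (by decide) (by decide)]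
      rcases rest with _ | ⟨d, rest⟩
      · rw [if_neg (by simp), pvFORgo_hash _ _ 1 _ (by simp [List.getD])]
        decide
      · simp only [List.all_cons, Bool.and_eq_true] at hall
        obtain ⟨hd, hall⟩ := hall
        have g1 : (('f' :: d :: rest) ++ ['#']).getD 1 '#' = d := by simp [List.getD]
        have hd' : d = 'f' ∨ d = 'o' ∨ d = 'r' := by
          simpa [pvTerminal] using hd
        rcases hd' with rfl | rfl | rfl
        · rw [if_neg (by simp), pvFORgo_err _ _ 1 'f' g1 (by decide) (by decide)]; decide
        · -- 'o' : Q1 → Q2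
          rw [pvFORgo_step_ok _ _ _ 'o' "Q2" g1 (by decide) (by decide) (by decide)]
          rcases rest with _ | ⟨e, rest⟩
          · rw [if_neg (by simp), pvFORgo_hash _ _ 2 _ (by simp [List.getD])]
            decide
          · simp only [List.all_cons, Bool.and_eq_true] at hall
            obtain ⟨he, hall⟩ := hall
            have g2 : (('f' :: 'o' :: e :: rest) ++ ['#']).getD 2 '#' = e := by
              simp [List.getD]
            have he' : e = 'f' ∨ e = 'o' ∨ e = 'r' := by
              simpa [pvTerminal] using he
            rcases he' with rfl | rfl | rfl
            · rw [if_neg (by simp), pvFORgo_err _ _ 2 'f' g2 (by decide) (by decide)]; decide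
            · rw [if_neg (by simp), pvFORgo_err _ _ 2 'o' g2 (by decide) (by decide)]; decide
            · -- 'r' : Q2 → FOR
              rw [pvFORgo_step_ok _ _ _ 'r' "FOR" g2 (by decide) (by decide) (by decide)]
              rcases rest with _ | ⟨g, rest⟩
              · rw [if_pos rfl, pvFORgo_hash _ _ 3 _ (by simp [List.getD])]
              · simp only [List.all_cons, Bool.and_eq_true] at hall
                obtain ⟨hg, hall⟩ := hall
                have g3 : (('f' :: 'o' :: 'r' :: g :: rest) ++ ['#']).getD 3 '#' = g := by
                  simp [List.getD]
                have hg' : g = 'f' ∨ g = 'o' ∨ g = 'r' := by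
                  simpa [pvTerminal] using hg
                have hgh : g ≠ '#' := by rcases hg' with rfl | rfl | rfl <;> decide
                have herr : (pvTabel.getD ((PySem.List.index? pvDaftarState "FOR").getD 0) []).getD
                    ((PySem.List.index? pvTerminal g).getD 0) "error" = "error" := by
                  rcases hg' with rfl | rfl | rfl <;> decide
                rw [if_neg (by simp), pvFORgo_err _ _ 3 g g3 hgh herr]; decide
        · rw [if_neg (by simp), pvFORgo_err _ _ 1 'r' g1 (by decide) (by decide)]; decide
    · rw [if_neg (by simp), pvFORgo_err _ _ 0 'o' g0 (by decide) (by decide)]; decide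
    · rw [if_neg (by simp), pvFORgo_err _ _ 0 'r' g0 (by decide) (by decide)]; decide

-- ===== VERDICT (by name: the statement is the Claim_ definition above) =====
theorem FOR_spec : Claim_equal_FOR := by
  intro teks _
  unfold Spec_FOR FOR FOR_alt
  show (if pvFORgo (teks.toList ++ ['#']) "Q0" 0
          ((decide ((teks.toList ++ ['#']).getD 0 '#' ≠ '#')) &&
            inTerminal (teks.toList ++ ['#']) pvTerminal) ≠ "FOR"
        then "error"
        else pvFORgo (teks.toList ++ ['#']) "Q0" 0
          ((decide ((teks.toList ++ ['#']).getD 0 '#' ≠ '#')) &&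
            inTerminal (teks.toList ++ ['#']) pvTerminal)) =
       (if teks = "for" then "FOR" else "error")
  have hstr : teks = "for" ↔ teks.toList = ['f', 'o', 'r'] :=
    ⟨fun h => by rw [h]; rfl, fun h => String.ext (by rw [h]; rfl)⟩
  rw [inTerminal_char]
  by_cases hall : teks.toList.all (· ∈ pvTerminal) = true
  · rw [hall, Bool.and_true]
    rcases hl : teks.toList with _ | ⟨c, rest⟩
    · -- empty string: the sentinel is the first character, status is false
      rw [(by simp [List.getD] : (([] : List Char) ++ ['#']).getD 0 '#' = '#')]
      simp only [ne_eq, not_true_eq_false, decide_false, pvFORgo_false]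
      rw [if_pos (by decide), if_neg (by rw [hstr, hl]; simp)]
    · have hc : c ∈ pvTerminal := by
        rw [hl] at hall
        simp only [List.all_cons, Bool.and_eq_true] at hall
        simpa using hall.1
      have hch : c ≠ '#' := by
        rcases (by simpa [pvTerminal] using hc : c = 'f' ∨ c = 'o' ∨ c = 'r') with
          rfl | rfl | rfl <;> decide
      rw [(by simp [List.getD] : ((c :: rest) ++ ['#']).getD 0 '#' = c),
          (by simp [hch] : decide (c ≠ '#') = true)]
      have hrun := run_all (c :: rest) (hl ▸ hall)
      by_cases heq : c :: rest = ['f', 'o', 'r']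
      · rw [if_pos heq] at hrun
        rw [hrun, if_neg (by decide), if_pos (hstr.mpr (hl ▸ heq))]
      · rw [if_neg heq] at hrun
        rw [if_pos hrun, if_neg (fun h => heq (hl ▸ hstr.mp h))]
  · -- some character outside {'f','o','r'}: the scan fails and the loop never runs
    rw [(by simpa using hall : teks.toList.all (· ∈ pvTerminal) = false),
        Bool.and_false, pvFORgo_false]
    rw [if_pos (by decide), if_neg (by
      intro h
      rw [hstr.mp h] at hall
      exact hall (by decide))]
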